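-- pv_equiv track=rewrite | github.com/siwon7/sam2act | scripts/analyze_memorybench_transition_flow.py | find_backtracks
-- ===== SOURCE A (Python) =====
-- def find_backtracks(labels: list[int]) -> list[dict]:
--     issues = []
--     best = -1
--     for step, lab in enumerate(labels):
--         if lab > best:
--             best = lab
--             continue
--         if lab < best:
--             issues.append({"step": int(step), "label": int(lab), "best_seen": int(best)})
--     return issues
-- ===== SOURCE B (Python) =====
-- def find_backtracks(labels: list[int]) -> list[dict]:
--     # exclusive prefix-maximum table: prefix[i] = max(-1, labels[0..i-1])
--     prefix = [-1]
--     for lab in labels: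
--         prefix.append(lab if lab > prefix[-1] else prefix[-1])
--     return [
--         {"step": int(i), "label": int(lab), "best_seen": int(prefix[i])}
--         for i, lab in enumerate(labels)
--         if lab < prefix[i]
--     ]
-- ===== Notes on version B (the rewrite author's own statement) =====
-- stated objective: alternative
-- what changed: Replaces A's single interleaved loop (mutable running max plus conditional append) with two separate passes: build an exclusive prefix-maximum table, then a filtering comprehension over enumerate(labels) zipped with that table.
import Mathlib
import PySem

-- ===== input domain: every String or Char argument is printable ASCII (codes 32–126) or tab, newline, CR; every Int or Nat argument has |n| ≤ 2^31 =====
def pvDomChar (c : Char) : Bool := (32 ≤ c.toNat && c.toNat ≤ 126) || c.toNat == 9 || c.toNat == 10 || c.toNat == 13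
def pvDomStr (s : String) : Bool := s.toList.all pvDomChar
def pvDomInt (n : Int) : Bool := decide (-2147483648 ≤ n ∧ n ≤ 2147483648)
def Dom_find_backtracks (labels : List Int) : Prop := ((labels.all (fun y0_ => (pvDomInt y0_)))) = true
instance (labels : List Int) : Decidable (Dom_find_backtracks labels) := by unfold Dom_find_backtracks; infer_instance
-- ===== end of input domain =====

-- B replaces A's single interleaved loop by an exclusive prefix-maximum table plus a
-- separate filtering pass (alternative decomposition, same value everywhere).

-- ===== PORT A =====
-- A: one loop over enumerate(labels) with mutable state (issues, best).
def find_backtracks (labels : List Int) : List (List (String × Int)) :=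
  ((PySem.List.enumerate labels 0).foldl
    (fun (st : List (List (String × Int)) × Int) sl =>
      let issues := st.1
      let best := st.2
      let step := sl.1
      let lab := sl.2
      if lab > best then (issues, lab)
      else if lab < best then
        (issues ++ [[("step", step), ("label", lab), ("best_seen", best)]], best)
      else (issues, best))
    ([], -1)).1

-- ===== PORT B =====
-- exclusive prefix-maximum table: entry i is max(best0, labels[0..i-1])
def pvPrefixMax (best : Int) : List Int → List Int
  | [] => []
  | x :: xs => best :: pvPrefixMax (if x > best then x else best) xs

def find_backtracks_alt (labels : List Int) : List (List (String × Int)) :=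
  ((PySem.List.enumerate labels 0).zip (pvPrefixMax (-1) labels)).filterMap
    (fun p =>
      if p.1.2 < p.2 then
        some [("step", p.1.1), ("label", p.1.2), ("best_seen", p.2)]
      else none)

-- ===== PRECONDITION & SPEC =====
def Spec_find_backtracks (labels : List Int) (out : List (List (String × Int))) : Prop := out = find_backtracks_alt labels
instance (labels : List Int) (out : List (List (String × Int))) : Decidable (Spec_find_backtracks labels out) := by unfold Spec_find_backtracks; infer_instance

-- ===== CLAIM (what is proved, stated in full; the proofs are below) =====
def Claim_equal_find_backtracks : Prop := ∀ (labels : List Int), Dom_find_backtracks labels → Spec_find_backtracks labels (find_backtracks labels)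

-- ===== LEMMAS AND PROOFS =====

theorem find_backtracks_go (labels : List Int) :
    ∀ (s best : Int) (acc : List (List (String × Int))),
    ((PySem.List.enumerate labels s).foldl
      (fun (st : List (List (String × Int)) × Int) sl =>
        let issues := st.1
        let best := st.2
        let step := sl.1
        let lab := sl.2
        if lab > best then (issues, lab)
        else if lab < best then
          (issues ++ [[("step", step), ("label", lab), ("best_seen", best)]], best)
        else (issues, best))
      (acc, best)).1
    = acc ++ ((PySem.List.enumerate labels s).zip (pvPrefixMax best labels)).filterMap
        (fun p =>
          if p.1.2 < p.2 then
            some [("step", p.1.1), ("label", p.1.2), ("best_seen", p.2)]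
          else none) := by
  induction labels with
  | nil => intro s best acc; simp [PySem.List.enumerate_nil]
  | cons x xs ih =>
    intro s best acc
    simp only [PySem.List.enumerate_cons, List.foldl_cons, List.zip_cons_cons,
      List.filterMap_cons, pvPrefixMax]
    by_cases h1 : x > best
    · have hn : ¬ x < best := by omega
      simp only [if_pos h1, if_neg hn]
      exact ih (s + 1) x acc
    · simp only [if_neg h1]
      by_cases h2 : x < best
      · simp only [if_pos h2, ih (s + 1) best _]
        simp
      · simp only [if_neg h2]
        exact ih (s + 1) best acc

-- ===== VERDICT (by name: the statement is the Claim_ definition above) =====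
theorem find_backtracks_spec : Claim_equal_find_backtracks := by
  intro labels _
  show find_backtracks labels = find_backtracks_alt labels
  unfold find_backtracks find_backtracks_alt
  simpa using find_backtracks_go labels 0 (-1) []
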